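-- pv_equiv track=rewrite | github.com/maenwi/Coding-Test-Problem-Solve | 백준/Bronze/1919/1919.py | make_alphabet_num
-- ===== SOURCE A (Python) =====
-- def make_alphabet_num(s1) -> set:
--
--     return_str1 = []
--     d1 = {}
--     for s in [s for s in s1]:
--         if s not in d1.keys():
--             d1[s] = 1
--         else:
--             d1[s] += 1
--         return_str1.append(f"{s}{d1[s]}")
--
--     return set(return_str1)
-- ===== SOURCE B (Python) =====
-- def make_alphabet_num(s1) -> set:
--     # Phase 1: group the positions of each character.
--     positions = {}
--     for i, c in enumerate(s1):
--         positions.setdefault(c, []).append(i)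
--     # Phase 2: annotate each position with its character's occurrence rank.
--     tags = [""] * len(s1)
--     for c, idxs in positions.items():
--         for k, p in enumerate(idxs, 1):
--             tags[p] = f"{c}{k}"
--     return set(tags)
-- ===== Notes on version B (the rewrite author's own statement) =====
-- stated objective: alternative
-- what changed: Replaces A's single streaming pass with a running per-char counter dict by a two-phase grouping algorithm: first build a table mapping each character to the list of its positions, then scatter the char-plus-rank tag into a position-indexed array (the k-th stored position of a char gets rank k) and return the set of that array.
import Mathlib
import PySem

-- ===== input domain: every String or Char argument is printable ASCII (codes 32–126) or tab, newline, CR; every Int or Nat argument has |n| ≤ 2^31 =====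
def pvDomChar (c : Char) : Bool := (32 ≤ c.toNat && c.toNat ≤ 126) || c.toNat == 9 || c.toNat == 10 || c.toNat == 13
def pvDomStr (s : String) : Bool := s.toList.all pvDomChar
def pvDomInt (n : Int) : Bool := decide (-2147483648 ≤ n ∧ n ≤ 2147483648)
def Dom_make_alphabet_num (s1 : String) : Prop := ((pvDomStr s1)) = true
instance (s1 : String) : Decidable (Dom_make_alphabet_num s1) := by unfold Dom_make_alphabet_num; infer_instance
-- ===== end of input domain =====

-- B replaces A's single streaming pass with a mutable running counter by a two-phase
-- grouping algorithm: first a table of each character's positions, then a scatter pass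
-- writing f"{c}{k}" at the k-th position of each character (alternative, not faster).


-- f"{c}{k}"
def pvTag (c : Char) (k : Int) : String := String.ofList [c] ++ PySem.Int.toStr k

-- ===== PORT A =====
-- one loop step of A: update the counter dict d1 for char s, append f"{s}{d1[s]}"
def pvStepA (p : PySem.Dict Char Int × List String) (s : Char) :
    PySem.Dict Char Int × List String :=
  let d1 := if p.1.contains s = false then p.1.insert s 1 else p.1.modify s 0 (· + 1)
  (d1, p.2 ++ [pvTag s (d1.getD s 0)])

def make_alphabet_num (s1 : String) : List String :=
  PySem.Set.ofList (s1.toList.foldl pvStepA (PySem.Dict.empty, [])).2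

-- ===== PORT B =====
def make_alphabet_num_alt (s1 : String) : List String :=
  let chars := s1.toList
  -- positions.setdefault(c, []).append(i)
  let positions := (PySem.List.enumerate chars).foldl
      (fun d ic => d.modify ic.2 ([] : List Int) (fun v => v ++ [ic.1])) PySem.Dict.empty
  -- tags = [""] * len(s1); for c, idxs in positions.items(): for k, p in enumerate(idxs, 1): tags[p] = f"{c}{k}"
  let tags := positions.items.foldl
      (fun ts ci => (PySem.List.enumerate ci.2 1).foldl
        (fun ts kp => PySem.List.pySetD ts kp.2 (pvTag ci.1 kp.1)) ts)
      (List.replicate chars.length "")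
  PySem.Set.ofList tags

-- ===== PRECONDITION & SPEC =====
def Spec_make_alphabet_num (s1 : String) (out : List String) : Prop := out = make_alphabet_num_alt s1
instance (s1 : String) (out : List String) : Decidable (Spec_make_alphabet_num s1 out) := by unfold Spec_make_alphabet_num; infer_instance

-- ===== CLAIM (what is proved, stated in full; the proofs are below) =====
def Claim_equal_make_alphabet_num : Prop := ∀ (s1 : String), Dom_make_alphabet_num s1 → Spec_make_alphabet_num s1 (make_alphabet_num s1)

-- ===== LEMMAS AND PROOFS =====

-- the tag of position j in chars: chars[j] followed by its count in chars[0..j]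
def pvTgtF (chars : List Char) (j : Nat) : String :=
  pvTag (chars.getD j 'a') (((chars.take j).count (chars.getD j 'a') : Int) + 1)

-- A's streaming list: entry for char c after prefix pref is f"{c}{count+1}"
def pvEnt (pref l : List Char) : List String :=
  match l with
  | [] => []
  | c :: l => pvTag c ((pref.count c : Int) + 1) :: pvEnt (pref ++ [c]) l

theorem pvStepA_getD (d : PySem.Dict Char Int) (acc : List String) (pref : List Char) (c : Char)
    (hinv : ∀ x, d.getD x 0 = (pref.count x : Int)) :
    ∀ x, (pvStepA (d, acc) c).1.getD x 0 = ((pref ++ [c]).count x : Int) := by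
  intro x
  simp only [pvStepA, List.count_append, List.count_singleton]
  by_cases hx : x = c
  · subst hx
    by_cases hc : d.contains x
    · rw [if_neg (by simp [hc]), PySem.Dict.getD_modify_self, hinv x]
      push_cast; simp
    · rw [if_pos (by simp [hc]), PySem.Dict.getD_insert_self]
      have h0 := PySem.Dict.getD_of_not_contains d (k := x) (0 : Int) (by simp [hc])
      have hcnt : pref.count x = 0 := by exact_mod_cast (hinv x).symm.trans h0
      simp [hcnt]
  · have hbeq : (x == c) = false := by simp [hx]
    have hgd : (pvStepA (d, acc) c).1.getD x 0 = d.getD x 0 := by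
      simp only [pvStepA]
      by_cases hc : d.contains c
      · rw [if_neg (by simp [hc])]
        exact PySem.Dict.getD_modify_of_ne d _ _ hx
      · rw [if_pos (by simp [hc])]
        exact PySem.Dict.getD_insert_of_ne d _ _ hx
    simp only [pvStepA] at hgd
    rw [hgd, hinv x]
    simp [Ne.symm hx]

theorem pvFoldA (l : List Char) : ∀ (p : PySem.Dict Char Int × List String)
    (pref : List Char), (∀ x, p.1.getD x 0 = (pref.count x : Int)) →
    (l.foldl pvStepA p).2 = p.2 ++ pvEnt pref l := by
  induction l with
  | nil => intro p pref _; simp [pvEnt]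
  | cons c l ih =>
    intro p pref hinv
    obtain ⟨d, acc⟩ := p
    simp only [List.foldl_cons]
    have hnew := pvStepA_getD d acc pref c hinv
    have hself : (pvStepA (d, acc) c).1.getD c 0 = (pref.count c : Int) + 1 := by
      rw [hnew c]; simp [List.count_append]
    have hacc : (pvStepA (d, acc) c).2 = acc ++ [pvTag c ((pref.count c : Int) + 1)] := by
      show acc ++ [pvTag c ((pvStepA (d, acc) c).1.getD c 0)] = _
      rw [hself]
    rw [ih (pvStepA (d, acc) c) (pref ++ [c]) hnew, hacc, pvEnt, List.append_assoc]
    rfl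

-- A's streaming list is the position-indexed target list
theorem pvEnt_eq (l : List Char) : ∀ (pref : List Char),
    pvEnt pref l = (List.range l.length).map (fun j => pvTgtF (pref ++ l) (pref.length + j)) := by
  induction l with
  | nil => intro pref; simp [pvEnt]
  | cons c l ih =>
    intro pref
    rw [pvEnt, List.length_cons, List.range_succ_eq_map, List.map_cons, List.map_map]
    congr 1
    · simp [pvTgtF, List.getD]
    · rw [ih (pref ++ [c])]
      apply List.map_congr_left
      intro j _
      have h1 : pref ++ c :: l = (pref ++ [c]) ++ l := by simp
      have h2 : pref.length + (j + 1) = (pref ++ [c]).length + j := by simp; omega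
      simp only [Function.comp, h1, h2, Nat.succ_eq_add_one]

-- ===== B-side =====

-- the positions list of char c: indices i with chars[i] = c, in order, as Ints
def pvIdxs (chars : List Char) (c : Char) : List Int :=
  (((PySem.List.enumerate chars).filter (fun ic => ic.2 == c)).map (fun ic => ic.1))

-- characterization of the grouping dict built in B's first loop
theorem pvPosGetD (chars : List Char) (c : Char) :
    ((PySem.List.enumerate chars).foldl
      (fun d ic => d.modify ic.2 ([] : List Int) (fun v => v ++ [ic.1]))
      PySem.Dict.empty).getD c [] = pvIdxs chars c := by
  have hmap : (PySem.List.enumerate chars).foldl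
      (fun d ic => d.modify ic.2 ([] : List Int) (fun v => v ++ [ic.1])) PySem.Dict.empty
      = ((PySem.List.enumerate chars).map Prod.swap).foldl
        (fun d p => d.modify p.1 ([] : List Int) (fun v => v ++ [p.2])) PySem.Dict.empty := by
    rw [List.foldl_map]; rfl
  rw [hmap, PySem.Dict.getD_foldl_modify_append]
  rw [List.filter_map, List.map_map]
  rfl
theorem pvPosKeys (chars : List Char) :
    ((PySem.List.enumerate chars).foldl
      (fun d ic => d.modify ic.2 ([] : List Int) (fun v => v ++ [ic.1]))
      PySem.Dict.empty).keys = PySem.Set.ofList chars := by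
  have h := PySem.Dict.keys_foldl_modify_key (PySem.List.enumerate chars)
    (fun ic => ic.2) ([] : List Int) (fun _ ic v => v ++ [ic.1]) PySem.Dict.empty
  simpa [PySem.List.map_snd_enumerate, PySem.Set.update, PySem.Set.ofList_eq_foldl] using h

-- nested scatter loop = fold of the flattened write list
theorem pvFoldFlat (L : List (Char × List Int)) : ∀ (ts : List String),
    L.foldl (fun ts ci => (PySem.List.enumerate ci.2 1).foldl
        (fun ts kp => PySem.List.pySetD ts kp.2 (pvTag ci.1 kp.1)) ts) ts
    = (L.flatMap (fun ci => (PySem.List.enumerate ci.2 1).map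
        (fun kp => (kp.2, pvTag ci.1 kp.1)))).foldl
        (fun ts pv => PySem.List.pySetD ts pv.1 pv.2) ts := by
  induction L with
  | nil => intro ts; rfl
  | cons ci L ih =>
    intro ts
    rw [List.foldl_cons, List.flatMap_cons, List.foldl_append, ih, List.foldl_map]

-- every x in a list occurs in its enumeration
theorem pvMemEnum {α : Type} (L : List α) (x : α) (hx : x ∈ L) (s : Int) :
    ∃ k, (k, x) ∈ PySem.List.enumerate L s := by
  obtain ⟨m, hm, he⟩ := List.mem_iff_getElem.mp hx
  exact ⟨s + m, (PySem.List.mem_enumerate_iff L s _).mpr ⟨m, hm, by rw [he]⟩⟩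

-- the t-th stored position of char c is an index m with chars[m] = c and t prior occurrences
theorem pvIdxsSpec (chars : List Char) : ∀ (s : Nat) (c : Char) (t : Nat)
    (ht : t < (((PySem.List.enumerate chars (s : Int)).filter (fun ic => ic.2 == c)).map (fun ic => ic.1)).length),
    ∃ m : Nat, (((PySem.List.enumerate chars (s : Int)).filter (fun ic => ic.2 == c)).map (fun ic => ic.1))[t] = ((s + m : Nat) : Int)
      ∧ m < chars.length ∧ chars.getD m 'a' = c ∧ (chars.take m).count c = t := by
  induction chars with
  | nil => intro s c t ht; simp [PySem.List.enumerate] at ht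
  | cons x chars ih =>
    intro s c t ht
    have hs : ((s : Int) + 1) = ((s + 1 : Nat) : Int) := by push_cast; ring
    simp only [PySem.List.enumerate_cons, hs] at ht ⊢
    by_cases hx : x = c
    · subst hx
      simp only [List.filter_cons, beq_self_eq_true, if_pos, List.map_cons] at ht ⊢
      match t with
      | 0 => exact ⟨0, by simp, by simp, by simp, by simp⟩
      | t + 1 =>
        simp only [List.length_cons, Nat.add_lt_add_iff_right] at ht
        obtain ⟨m, h1, h2, h3, h4⟩ := ih (s + 1) x t ht
        refine ⟨m + 1, ?_, by simpa using Nat.succ_lt_succ h2, by simpa using h3, by simp [List.take_succ_cons, h4]⟩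
        simpa [Nat.add_assoc, Nat.add_comm 1 m] using h1
    · have hb : (x == c) = false := by simp [hx]
      simp only [List.filter_cons, hb, Bool.false_eq_true, if_neg, not_false_iff] at ht ⊢
      obtain ⟨m, h1, h2, h3, h4⟩ := ih (s + 1) c t ht
      refine ⟨m + 1, ?_, by simpa using Nat.succ_lt_succ h2, by simpa using h3, by simp [List.take_succ_cons, hx, h4]⟩
      simpa [Nat.add_assoc, Nat.add_comm 1 m] using h1

-- scatter fold: when every write (p, v) has v determined by its position p as f p,
-- the result at j is f j if j was written, else the initial value
theorem pvScatter (f : Nat → String) : ∀ (W : List (Int × String)) (ts0 : List String),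
    (∀ pv ∈ W, ∃ m : Nat, m < ts0.length ∧ pv.1 = (m : Int) ∧ pv.2 = f m) →
    (W.foldl (fun ts pv => PySem.List.pySetD ts pv.1 pv.2) ts0).length = ts0.length ∧
    ∀ j < ts0.length, (W.foldl (fun ts pv => PySem.List.pySetD ts pv.1 pv.2) ts0).getD j ""
      = if (j : Int) ∈ W.map Prod.fst then f j else ts0.getD j "" := by
  intro W
  induction W with
  | nil => intro ts0 _; exact ⟨rfl, by simp⟩
  | cons pv W ih =>
    intro ts0 hW
    obtain ⟨m, hm, hp, hv⟩ := hW pv (List.mem_cons_self ..)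
    have hset : PySem.List.pySetD ts0 pv.1 pv.2 = ts0.set m (f m) := by
      rw [hp, hv, PySem.List.pySetD_natCast]
    have hlen : (ts0.set m (f m)).length = ts0.length := by simp
    have hW' : ∀ q ∈ W, ∃ m' : Nat, m' < (ts0.set m (f m)).length ∧ q.1 = (m' : Int) ∧ q.2 = f m' := by
      intro q hq; obtain ⟨m', h1, h2, h3⟩ := hW q (List.mem_cons_of_mem _ hq)
      exact ⟨m', by omega, h2, h3⟩
    obtain ⟨ihlen, ihget⟩ := ih (ts0.set m (f m)) hW'
    simp only [List.foldl_cons, hset]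
    refine ⟨by rw [ihlen, hlen], ?_⟩
    intro j hj
    rw [ihget j (by omega)]
    have hget : ∀ j' : Nat, (ts0.set m (f m))[j']?.getD "" = if j' = m then f m else ts0[j']?.getD "" := by
      intro j'
      by_cases hjm : j' = m
      · subst hjm; simp [hm]
      · simp [List.getElem?_set_ne (fun h => hjm h.symm), hjm]
    by_cases hjW : (j : Int) ∈ W.map Prod.fst
    · simp [hjW]
    · by_cases hjm : j = m
      · subst hjm
        have hmem : (j : Int) ∈ (pv :: W).map Prod.fst := by simp [hp]
        simp [List.getD, hjW, hget, hp]
      · have hnm : (j : Int) ∉ (pv :: W).map Prod.fst := by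
          simp only [List.map_cons, List.mem_cons, hp]
          rintro (h | h)
          · exact hjm (by exact_mod_cast h)
          · exact hjW h
        have hne : ((j : Int) = pv.1) = False := by
          simp only [hp, Int.natCast_inj, eq_iff_iff, iff_false]
          exact hjm
        simp [List.getD, hjW, hget, hjm, hne]

-- ===== VERDICT helper: both ports compute Set.ofList of the target list =====
theorem pvA_eq (s1 : String) :
    make_alphabet_num s1
      = PySem.Set.ofList ((List.range s1.toList.length).map (pvTgtF s1.toList)) := by
  unfold make_alphabet_num
  have hA := pvFoldA s1.toList (PySem.Dict.empty, []) []
    (by intro x; simp [PySem.Dict.getD_empty])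
  simp only [List.nil_append] at hA
  rw [hA, pvEnt_eq]
  simp

theorem pvB_unfold (s1 : String) : make_alphabet_num_alt s1 = PySem.Set.ofList
    ((((PySem.List.enumerate s1.toList).foldl
        (fun d ic => d.modify ic.2 ([] : List Int) (fun v => v ++ [ic.1])) PySem.Dict.empty).items).foldl
      (fun ts ci => (PySem.List.enumerate ci.2 1).foldl
        (fun ts kp => PySem.List.pySetD ts kp.2 (pvTag ci.1 kp.1)) ts)
      (List.replicate s1.toList.length "")) := rfl

theorem pvB_eq (s1 : String) :
    make_alphabet_num_alt s1
      = PySem.Set.ofList ((List.range s1.toList.length).map (pvTgtF s1.toList)) := by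
  rw [pvB_unfold]
  set chars := s1.toList with hchars
  set D := (PySem.List.enumerate chars).foldl
      (fun d ic => d.modify ic.2 ([] : List Int) (fun v => v ++ [ic.1])) PySem.Dict.empty with hD
  have hkeys : D.keys = PySem.Set.ofList chars := pvPosKeys chars
  have hnodup : D.keys.Nodup := by rw [hkeys]; exact PySem.Set.nodup_ofList chars
  have hitems : D.items = (PySem.Set.ofList chars).map (fun c => (c, pvIdxs chars c)) := by
    rw [PySem.Dict.items_eq_map_keys D hnodup ([] : List Int), hkeys]
    exact List.map_congr_left (fun c _ => by rw [pvPosGetD])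
  -- the flattened write list
  set W := D.items.flatMap (fun ci => (PySem.List.enumerate ci.2 1).map
      (fun kp => (kp.2, pvTag ci.1 kp.1))) with hW
  have hval : ∀ pv ∈ W, ∃ m : Nat, m < chars.length ∧ pv.1 = (m : Int) ∧ pv.2 = pvTgtF chars m := by
    intro pv hpv
    rw [hW, List.mem_flatMap] at hpv
    obtain ⟨ci, hci, hpv⟩ := hpv
    rw [hitems, List.mem_map] at hci
    obtain ⟨c, hc, hci⟩ := hci
    subst hci
    rw [List.mem_map] at hpv
    obtain ⟨kp, hkp, hpv⟩ := hpv
    rw [PySem.List.mem_enumerate_iff] at hkp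
    obtain ⟨t, ht, hkp⟩ := hkp
    obtain ⟨m, h1, h2, h3, h4⟩ := pvIdxsSpec chars 0 c t (by simpa [pvIdxs] using ht)
    have h1' : (pvIdxs chars c)[t]'ht = (m : Int) := by simpa [pvIdxs] using h1
    refine ⟨m, h2, ?_, ?_⟩
    · rw [← hpv]
      simp [hkp, h1']
    · rw [← hpv]
      simp only [hkp]
      simp only [pvTgtF, h3, h4]
      congr 1
      push_cast
      omega
  have hcov : ∀ j, j < chars.length → (j : Int) ∈ W.map Prod.fst := by
    intro j hj
    have hcj : chars.getD j 'a' ∈ PySem.Set.ofList chars := by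
      rw [PySem.Set.mem_ofList]
      have : chars.getD j 'a' = chars[j] := by simp [List.getD, List.getElem?_eq_getElem hj]
      rw [this]
      exact List.getElem_mem hj
    have hjidx : (j : Int) ∈ pvIdxs chars (chars.getD j 'a') := by
      rw [pvIdxs, List.mem_map]
      refine ⟨((j : Int), chars.getD j 'a'), ?_, rfl⟩
      rw [List.mem_filter]
      constructor
      · rw [PySem.List.mem_enumerate_iff]
        exact ⟨j, hj, by simp [List.getD, List.getElem?_eq_getElem hj]⟩
      · simp
    obtain ⟨k, hk⟩ := pvMemEnum _ _ hjidx 1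
    rw [hW, List.map_flatMap]
    rw [List.mem_flatMap]
    refine ⟨(chars.getD j 'a', pvIdxs chars (chars.getD j 'a')), ?_, ?_⟩
    · rw [hitems, List.mem_map]; exact ⟨chars.getD j 'a', hcj, rfl⟩
    · simp only [List.map_map]
      rw [List.mem_map]
      exact ⟨(k, (j : Int)), hk, rfl⟩
  have hflat := pvFoldFlat D.items (List.replicate chars.length "")
  obtain ⟨hlen, hget⟩ := pvScatter (pvTgtF chars) W (List.replicate chars.length "")
    (by simpa using hval)
  rw [hflat, ← hW]
  congr 1
  apply List.ext_getElem
  · simp [hlen]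
  · intro j hj hj'
    have hjn : j < chars.length := by simpa [hlen] using hj
    have h := hget j (by simpa using hjn)
    rw [if_pos (hcov j hjn), List.getD_eq_getElem _ "" hj] at h
    simp only [List.getElem_map, List.getElem_range]
    exact h

-- ===== VERDICT (by name: the statement is the Claim_ definition above) =====
theorem make_alphabet_num_spec : Claim_equal_make_alphabet_num := by
  intro s1 _
  unfold Spec_make_alphabet_num
  rw [pvA_eq, pvB_eq]
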